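-- pv_equiv track=rewrite | github.com/Patrik1352/Yandex_algo | 3/C.py | min_numbers_to_remove_correct
-- ===== SOURCE A (Python) =====
-- def min_numbers_to_remove_correct(a):
--     # Сортируем массив
--     a.sort()
--
--     # Инициализируем переменные для подсчета
--     counts = {}
--     # Подсчитываем количество каждого числа в массиве
--     for number in a:
--         if number in counts:
--             counts[number] += 1
--         else:
--             counts[number] = 1
--
--     # Находим два самых частых соседних числа (разность которых не превышает 1)
--     max_pair_count = 0
--     sorted_keys = sorted(counts.keys())
--     for i in range(len(sorted_keys) - 1):
--         if sorted_keys[i + 1] - sorted_keys[i] <= 1: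
--             max_pair_count = max(max_pair_count, counts[sorted_keys[i]] + counts[sorted_keys[i + 1]])
--         else:
--             max_pair_count = max(max_pair_count, counts[sorted_keys[i]])
--     max_pair_count = max(max_pair_count, counts[sorted_keys[-1]])  # Убедимся, что учли последний элемент
--
--     # Возвращаем количество чисел для удаления
--     return len(a) - max_pair_count
-- ===== SOURCE B (Python) =====
-- def min_numbers_to_remove_correct(a):
--     # One pass to count; for each key pair it with key+1 via a dict lookup: no sorting.
--     counts = {}
--     for x in a:
--         counts[x] = counts.get(x, 0) + 1
--     best = max(c + counts.get(k + 1, 0) for k, c in counts.items())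
--     return len(a) - best
-- ===== Notes on version B (the rewrite author's own statement) =====
-- stated objective: faster
-- what changed: Replaces A's two sorts and adjacent-key scan over sorted keys by a single hash-count pass plus, for each key k, the direct lookup counts.get(k+1,0), removing sorting entirely.
import Mathlib
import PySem

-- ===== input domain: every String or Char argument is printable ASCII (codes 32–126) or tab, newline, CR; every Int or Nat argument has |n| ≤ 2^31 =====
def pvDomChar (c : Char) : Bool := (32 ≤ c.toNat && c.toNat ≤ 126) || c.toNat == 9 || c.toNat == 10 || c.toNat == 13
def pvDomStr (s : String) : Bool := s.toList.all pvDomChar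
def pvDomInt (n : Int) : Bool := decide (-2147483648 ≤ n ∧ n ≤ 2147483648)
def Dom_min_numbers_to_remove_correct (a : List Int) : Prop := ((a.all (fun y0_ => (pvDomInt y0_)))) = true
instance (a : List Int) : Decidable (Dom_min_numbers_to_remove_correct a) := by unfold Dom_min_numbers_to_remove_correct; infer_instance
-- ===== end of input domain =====

-- B replaces A's two sorts and adjacent-sorted-key scan by one counting pass and a
-- counts.get(k+1, 0) lookup per key. Equivalence is about the RETURN value only:
-- A sorts its argument in place, B does not mutate it.

-- ===== PORT A =====
def min_numbers_to_remove_correct (a : List Int) : Int :=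
  let a2 := PySem.List.sorted a (fun x => x) false
  let counts := a2.foldl (fun d number =>
      if d.contains number then d.insert number (d.getD number 0 + 1)
      else d.insert number 1) PySem.Dict.empty
  let sortedKeys := PySem.List.sorted counts.keys (fun x => x) false
  let maxPair : Int := (PySem.List.pyRange 0 ((sortedKeys.length : Int) - 1) 1).foldl
      (fun m i =>
        if PySem.List.pyGetD sortedKeys (i + 1) 0 - PySem.List.pyGetD sortedKeys i 0 ≤ 1 then
          max m (counts.getD (PySem.List.pyGetD sortedKeys i 0) 0 +
                 counts.getD (PySem.List.pyGetD sortedKeys (i + 1) 0) 0)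
        else
          max m (counts.getD (PySem.List.pyGetD sortedKeys i 0) 0)) 0
  let maxPair2 := max maxPair (counts.getD (PySem.List.pyGetD sortedKeys (-1) 0) 0)
  (a2.length : Int) - maxPair2

-- ===== PORT B =====
def min_numbers_to_remove_correct_alt (a : List Int) : Int :=
  let counts := a.foldl (fun d x => d.insert x (d.getD x 0 + 1)) PySem.Dict.empty
  let best := (PySem.List.max? (counts.items.map (fun p => p.2 + counts.getD (p.1 + 1) 0))
      (fun x => x)).getD 0
  (a.length : Int) - best

-- ===== PRECONDITION & SPEC =====
-- Pre_ excludes only the empty list, on which A raises IndexError (sorted_keys[-1]).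
def Pre_min_numbers_to_remove_correct (a : List Int) : Prop := a ≠ []
instance (a : List Int) : Decidable (Pre_min_numbers_to_remove_correct a) := by
  unfold Pre_min_numbers_to_remove_correct; infer_instance
def pvWitness_min_numbers_to_remove_correct : List Int := [3, 1, 2, 2]

def Spec_min_numbers_to_remove_correct (a : List Int) (out : Int) : Prop := out = min_numbers_to_remove_correct_alt a
instance (a : List Int) (out : Int) : Decidable (Spec_min_numbers_to_remove_correct a out) := by unfold Spec_min_numbers_to_remove_correct; infer_instance

-- ===== CLAIM (what is proved, stated in full; the proofs are below) =====
def Claim_equal_min_numbers_to_remove_correct : Prop := ∀ (a : List Int), Dom_min_numbers_to_remove_correct a → Pre_min_numbers_to_remove_correct a → Spec_min_numbers_to_remove_correct a (min_numbers_to_remove_correct a)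

-- ===== LEMMAS AND PROOFS =====

-- the shared score of a key k: how many elements of a lie in {k, k+1}
def pvScore (a : List Int) (k : Int) : Int := (a.count k : Int) + (a.count (k + 1) : Int)

-- monotone indexing in a strictly increasing list
theorem pvGetElem_mono {L : List Int} (h : L.Pairwise (· < ·)) {i j : Nat}
    (hij : i ≤ j) (hj : j < L.length) :
    L[i]'(lt_of_le_of_lt (by omega) hj) ≤ L[j] := by
  rcases Nat.lt_or_ge i j with hlt | hge
  · exact le_of_lt ((List.pairwise_iff_getElem.mp h) i j _ hj hlt)
  · have : i = j := le_antisymm hij hge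
    subst this; exact le_refl _

-- A's adjacent-key scan over a strictly increasing key list K computes the running max
-- of pvScore over K: adjacent keys ≤ 1 apart are exactly k and k+1, and when the next
-- key is further away (or for the last key) a contributes nothing at k+1.
theorem pvLoopA (a K : List Int) (hlt : K.Pairwise (· < ·))
    (hmem : ∀ x, x ∈ K ↔ x ∈ a) (hne : K ≠ []) :
    max ((PySem.List.pyRange 0 ((K.length : Int) - 1) 1).foldl
        (fun m i => if PySem.List.pyGetD K (i+1) 0 - PySem.List.pyGetD K i 0 ≤ 1 then
            max m ((a.count (PySem.List.pyGetD K i 0) : Int) + (a.count (PySem.List.pyGetD K (i+1) 0) : Int))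
          else max m ((a.count (PySem.List.pyGetD K i 0) : Int))) 0)
      ((a.count (PySem.List.pyGetD K (-1) 0) : Int))
    = (K.map (pvScore a)).foldl max 0 := by
  have hKlen : 0 < K.length := List.length_pos_iff.mpr hne
  have hif : (fun (m i : Int) => if PySem.List.pyGetD K (i+1) 0 - PySem.List.pyGetD K i 0 ≤ 1 then
            max m ((a.count (PySem.List.pyGetD K i 0) : Int) + (a.count (PySem.List.pyGetD K (i+1) 0) : Int))
          else max m ((a.count (PySem.List.pyGetD K i 0) : Int)))
      = fun m i => max m (if PySem.List.pyGetD K (i+1) 0 - PySem.List.pyGetD K i 0 ≤ 1 then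
            ((a.count (PySem.List.pyGetD K i 0) : Int) + (a.count (PySem.List.pyGetD K (i+1) 0) : Int))
          else ((a.count (PySem.List.pyGetD K i 0) : Int))) := by
    funext m i; split <;> rfl
  rw [hif, ← List.foldl_map]
  have hmap : (PySem.List.pyRange 0 ((K.length : Int) - 1) 1).map
      (fun i => if PySem.List.pyGetD K (i+1) 0 - PySem.List.pyGetD K i 0 ≤ 1 then
            ((a.count (PySem.List.pyGetD K i 0) : Int) + (a.count (PySem.List.pyGetD K (i+1) 0) : Int))
          else ((a.count (PySem.List.pyGetD K i 0) : Int)))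
      = K.dropLast.map (pvScore a) := by
    apply List.ext_getElem
    · simp only [List.length_map, PySem.List.length_pyRange_one, List.length_dropLast]
      omega
    · intro j hj1 hj2
      simp only [List.getElem_map]
      have hjlt : j + 1 < K.length := by
        simp only [List.length_map, List.length_dropLast] at hj2; omega
      rw [PySem.List.getElem_pyRange_one, zero_add]
      have hg1 : PySem.List.pyGetD K ((j : Int)) 0 = K[j]'(by omega) := by
        rw [PySem.List.pyGetD_natCast, List.getD_eq_getElem]
      have hcast : ((j : Int) + 1) = ((j + 1 : Nat) : Int) := by push_cast; ring
      have hg2 : PySem.List.pyGetD K ((j : Int) + 1) 0 = K[j+1] := by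
        rw [hcast, PySem.List.pyGetD_natCast, List.getD_eq_getElem]
      rw [hg1, hg2, List.getElem_dropLast]
      have hadj : K[j]'(by omega) < K[j+1] :=
        (List.pairwise_iff_getElem.mp hlt) j (j+1) (by omega) hjlt (by omega)
      by_cases hc : K[j+1] - K[j]'(by omega) ≤ 1
      · have heq : K[j+1] = K[j]'(by omega) + 1 := by omega
        simp [pvScore, heq]
      · have hnot : K[j]'(by omega) + 1 ∉ a := by
          intro hmem'
          obtain ⟨j', hj', hEq⟩ := List.mem_iff_getElem.mp ((hmem _).mpr hmem')
          rcases Nat.lt_or_ge j j' with hgt | hle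
          · have := pvGetElem_mono hlt (by omega : j + 1 ≤ j') hj'
            omega
          · have := pvGetElem_mono hlt hle (by omega : j < K.length)
            omega
        have hz : a.count (K[j]'(by omega) + 1) = 0 := List.count_eq_zero.mpr hnot
        simp [hc, pvScore, hz]
  rw [hmap]
  have hlastscore : (a.count (PySem.List.pyGetD K (-1) 0) : Int) = pvScore a (K.getLast hne) := by
    rw [PySem.List.pyGetD_neg_one K 0 hne]
    have hnot : K.getLast hne + 1 ∉ a := by
      intro hmem'
      obtain ⟨j', hj', hEq⟩ := List.mem_iff_getElem.mp ((hmem _).mpr hmem')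
      have h1 : K[j']'hj' ≤ K[K.length - 1]'(by omega) := pvGetElem_mono hlt (by omega) (by omega)
      rw [← List.getLast_eq_getElem hne] at h1
      omega
    have hz : a.count (K.getLast hne + 1) = 0 := List.count_eq_zero.mpr hnot
    simp [pvScore, hz]
  rw [hlastscore]
  conv_rhs => rw [← List.dropLast_append_getLast hne]
  rw [List.map_append, List.foldl_append]
  simp

-- B's port in normal form: len a minus the max score over the distinct values of a
theorem pvAlt_eq (a : List Int) (ha : a ≠ []) :
    min_numbers_to_remove_correct_alt a =
      (a.length : Int) - ((PySem.Set.ofList a).map (pvScore a)).foldl max 0 := by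
  show (a.length : Int) -
      (PySem.List.max? (((a.foldl (fun d x => d.insert x (d.getD x 0 + 1)) PySem.Dict.empty).items).map
        (fun p => p.2 + (a.foldl (fun d x => d.insert x (d.getD x 0 + 1)) PySem.Dict.empty).getD (p.1 + 1) 0))
        (fun x => x)).getD 0 = _
  rw [PySem.Dict.foldl_insert_getD_add_one_eq_counter]
  rw [PySem.Dict.items_counter, List.map_map]
  have hmap : ((fun (p : Int × Int) => p.2 + (PySem.Dict.counter a).getD (p.1 + 1) 0) ∘
      fun k => (k, (a.count k : Int))) = pvScore a := by
    funext k
    simp [pvScore, PySem.Dict.getD_counter]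
  rw [hmap]
  obtain ⟨s0, S', hS⟩ : ∃ s0 S', PySem.Set.ofList a = s0 :: S' := by
    rcases hq : PySem.Set.ofList a with _ | ⟨s0, S'⟩
    · exfalso
      rcases a with _ | ⟨x, t⟩
      · exact ha rfl
      · have : x ∈ PySem.Set.ofList (x :: t) := (PySem.Set.mem_ofList _ _).mpr (by simp)
        rw [hq] at this; simp at this
    · exact ⟨_, _, rfl⟩
  rw [hS]
  simp only [List.map_cons]
  rw [PySem.List.max?_id_cons]
  simp only [Option.getD_some]
  rw [List.foldl_cons]
  have : max 0 (pvScore a s0) = pvScore a s0 := by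
    have : 0 ≤ pvScore a s0 := by unfold pvScore; positivity
    omega
  rw [this]

-- A's port in the same normal form
theorem pvA_eq (a : List Int) (ha : a ≠ []) :
    min_numbers_to_remove_correct a =
      (a.length : Int) - ((PySem.Set.ofList a).map (pvScore a)).foldl max 0 := by
  have hstep : (fun (d : PySem.Dict Int Int) number =>
      if d.contains number then d.insert number (d.getD number 0 + 1)
      else d.insert number 1) = fun d number => d.insert number (d.getD number 0 + 1) := by
    funext d n
    cases h : d.contains n
    · simp [PySem.Dict.getD_of_not_contains d 0 h]
    · simp
  unfold min_numbers_to_remove_correct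
  simp only []
  rw [hstep, PySem.Dict.foldl_insert_getD_add_one_eq_counter, PySem.Dict.keys_counter]
  simp only [PySem.Dict.getD_counter]
  have hcnt : ∀ v, List.count v (PySem.List.sorted a (fun x => x) false) = List.count v a :=
    fun v => (PySem.List.sorted_perm a (fun x => x) false).count_eq v
  simp only [hcnt]
  have hmem : ∀ x, x ∈ PySem.List.sorted (PySem.Set.ofList (PySem.List.sorted a (fun x => x) false)) (fun x => x) false ↔ x ∈ a := by
    intro x
    rw [PySem.List.mem_sorted, PySem.Set.mem_ofList, PySem.List.mem_sorted]
  have hne : PySem.List.sorted (PySem.Set.ofList (PySem.List.sorted a (fun x => x) false)) (fun x => x) false ≠ [] := by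
    obtain ⟨x, t, rfl⟩ := List.exists_cons_of_ne_nil ha
    exact List.ne_nil_of_mem ((hmem x).mpr (by simp))
  rw [pvLoopA a _ (PySem.List.sorted_ofList_pairwise_lt _) hmem hne, PySem.List.length_sorted]
  have hperm : (PySem.List.sorted (PySem.Set.ofList (PySem.List.sorted a (fun x => x) false)) (fun x => x) false).Perm (PySem.Set.ofList a) := by
    refine (PySem.List.sorted_perm _ _ _).trans ?_
    refine (List.perm_ext_iff_of_nodup (PySem.Set.nodup_ofList _) (PySem.Set.nodup_ofList _)).mpr ?_
    intro x
    rw [PySem.Set.mem_ofList, PySem.Set.mem_ofList, PySem.List.mem_sorted]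
  rw [(hperm.map (pvScore a)).foldl_eq 0]

-- ===== VERDICT (by name: the statement is the Claim_ definition above) =====
theorem min_numbers_to_remove_correct_spec : Claim_equal_min_numbers_to_remove_correct := by
  intro a _ hpre
  unfold Spec_min_numbers_to_remove_correct
  rw [pvA_eq a hpre, pvAlt_eq a hpre]
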